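-- pv_equiv track=rewrite | github.com/juaness38/app | backend/src/core/pipeline.py | _estimate_charge_distribution
-- ===== SOURCE A (Python) =====
-- from typing import Dict, Any, List, Optional
--
-- def _estimate_charge_distribution(sequence: str) -> Dict[str, int]:
--     """Estima distribución de cargas para proteínas."""
--     try:
--         positive_residues = "RK"
--         negative_residues = "DE"
--         return {
--             "positive": sum(sequence.count(aa) for aa in positive_residues),
--             "negative": sum(sequence.count(aa) for aa in negative_residues),
--             "neutral": len(sequence) - sum(sequence.count(aa) for aa in positive_residues + negative_residues)
--         }
--     except:
--         return {"positive": 0, "negative": 0, "neutral": 0}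
-- ===== SOURCE B (Python) =====
-- def _estimate_charge_distribution(sequence: str):
--     """Estima distribución de cargas para proteínas."""
--     try:
--         positive = negative = neutral = 0
--         for c in sequence:
--             if c in "RK":
--                 positive += 1
--             elif c in "DE":
--                 negative += 1
--             else:
--                 neutral += 1
--         return {"positive": positive, "negative": negative, "neutral": neutral}
--     except:
--         return {"positive": 0, "negative": 0, "neutral": 0}
-- ===== Notes on version B (the rewrite author's own statement) =====
-- stated objective: simpler
-- what changed: Replaces A's four repeated sequence.count scans (eight passes over the string plus len) with a single classifying loop that maintains three counters in one pass.
import Mathlib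
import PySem

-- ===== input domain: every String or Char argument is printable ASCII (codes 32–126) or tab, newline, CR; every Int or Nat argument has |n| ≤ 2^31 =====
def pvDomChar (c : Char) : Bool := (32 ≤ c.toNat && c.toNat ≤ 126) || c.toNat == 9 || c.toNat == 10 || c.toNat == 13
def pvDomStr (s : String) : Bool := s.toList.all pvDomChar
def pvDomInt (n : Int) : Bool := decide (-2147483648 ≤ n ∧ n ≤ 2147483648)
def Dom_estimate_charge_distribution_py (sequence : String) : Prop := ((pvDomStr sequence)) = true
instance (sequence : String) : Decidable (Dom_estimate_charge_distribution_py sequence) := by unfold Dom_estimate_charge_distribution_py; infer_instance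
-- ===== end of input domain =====

-- B replaces A's repeated sequence.count scans with a single classifying pass keeping three counters (objective: simpler).

-- ===== PORT A =====
-- sum(sequence.count(aa) for aa in residues): map each residue char to its substring count, sum.
def pvSumCounts (sequence : String) (residues : String) : Int :=
  (residues.toList.map (fun aa => (PySem.Str.count sequence (String.ofList [aa]) : Int))).sum

def estimate_charge_distribution_py (sequence : String) : List (String × Int) :=
  let positive_residues := "RK"
  let negative_residues := "DE"
  [("positive", pvSumCounts sequence positive_residues),
   ("negative", pvSumCounts sequence negative_residues),
   ("neutral", (PySem.Str.len sequence : Int) - pvSumCounts sequence (positive_residues ++ negative_residues))]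

-- ===== PORT B =====
-- the body of B's loop: classify one character, bump one of the three counters
def pvClassify (acc : Int × Int × Int) (c : Char) : Int × Int × Int :=
  if PySem.Str.isIn (String.ofList [c]) "RK" then (acc.1 + 1, acc.2.1, acc.2.2)
  else if PySem.Str.isIn (String.ofList [c]) "DE" then (acc.1, acc.2.1 + 1, acc.2.2)
  else (acc.1, acc.2.1, acc.2.2 + 1)
-- single pass: classify each character, increment one of three counters
def estimate_charge_distribution_py_alt (sequence : String) : List (String × Int) :=
  let counts := sequence.toList.foldl pvClassify (0, 0, 0)
  [("positive", counts.1), ("negative", counts.2.1), ("neutral", counts.2.2)]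

-- ===== PRECONDITION & SPEC =====
def Spec_estimate_charge_distribution_py (sequence : String) (out : List (String × Int)) : Prop := out = estimate_charge_distribution_py_alt sequence
instance (sequence : String) (out : List (String × Int)) : Decidable (Spec_estimate_charge_distribution_py sequence out) := by unfold Spec_estimate_charge_distribution_py; infer_instance

-- ===== CLAIM (what is proved, stated in full; the proofs are below) =====
def Claim_equal_estimate_charge_distribution_py : Prop := ∀ (sequence : String), Dom_estimate_charge_distribution_py sequence → Spec_estimate_charge_distribution_py sequence (estimate_charge_distribution_py sequence)

-- ===== LEMMAS AND PROOFS =====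

-- a single-character needle: substring count = character count
theorem pv_count_go_singleton (s : List Char) (c : Char) (acc : Nat) :
    PySem.Chars.count.go [c] s.length s acc = acc + s.count c := by
  induction s generalizing acc with
  | nil => simp [PySem.Chars.count.go]
  | cons h tl ih =>
      simp only [PySem.Chars.count.go, List.count_cons, List.length_cons,
        List.isPrefixOf, List.length_nil, List.drop_succ_cons, List.drop_zero]
      by_cases hc : c == h
      · simp_all; omega
      · have : ¬ (h == c) = true := by simpa [BEq.comm] using hc
        simp_all

theorem pv_count_singleton (s : List Char) (c : Char) :
    PySem.Chars.count s [c] = s.count c := by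
  cases s with
  | nil => rfl
  | cons h tl => simpa [PySem.Chars.count] using pv_count_go_singleton (h :: tl) c 0

-- singleton membership in a two-character string
theorem pv_isIn_pair (h a b : Char) : PySem.Chars.isIn [h] [a, b] = (h == a || h == b) := by
  by_cases h1 : h = a
  · subst h1
    have : PySem.Chars.isIn [h] [h, b] = true := by
      rw [PySem.Chars.isIn_iff_infix]; exact ⟨[], [b], rfl⟩
    simp [this]
  · by_cases h2 : h = b
    · subst h2
      have : PySem.Chars.isIn [h] [a, h] = true := by
        rw [PySem.Chars.isIn_iff_infix]; exact ⟨[a], [], rfl⟩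
      simp [this]
    · have hr : (h == a || h == b) = false := by simp_all
      rw [hr, PySem.Chars.isIn_eq_false_iff]
      intro hinf
      have hm : h ∈ [a, b] := hinf.subset (List.mem_singleton_self h)
      simp at hm; tauto

-- the loop invariant for B's single pass
theorem pv_fold_inv (l : List Char) (p n u : Int) :
    l.foldl pvClassify (p, n, u)
    = (p + l.count 'R' + l.count 'K',
       n + l.count 'D' + l.count 'E',
       u + (l.length : Int) - (l.count 'R' + l.count 'K' + l.count 'D' + l.count 'E')) := by
  induction l generalizing p n u with
  | nil => simp
  | cons h tl ih =>
      rw [List.foldl_cons]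
      by_cases hR : h = 'R'
      · subst hR
        rw [show pvClassify (p, n, u) 'R' = (p + 1, n, u) from by
          simp [pvClassify, pv_isIn_pair], ih]
        simp [Prod.ext_iff]
        omega
      · by_cases hK : h = 'K'
        · subst hK
          rw [show pvClassify (p, n, u) 'K' = (p + 1, n, u) from by
            simp [pvClassify, pv_isIn_pair], ih]
          simp [Prod.ext_iff]
          omega
        · by_cases hD : h = 'D'
          · subst hD
            rw [show pvClassify (p, n, u) 'D' = (p, n + 1, u) from by
              simp [pvClassify, pv_isIn_pair], ih]
            simp [Prod.ext_iff]
            omega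
          · by_cases hE : h = 'E'
            · subst hE
              rw [show pvClassify (p, n, u) 'E' = (p, n + 1, u) from by
                simp [pvClassify, pv_isIn_pair], ih]
              simp [Prod.ext_iff]
              omega
            · rw [show pvClassify (p, n, u) h = (p, n, u + 1) from by
                simp [pvClassify, pv_isIn_pair, hR, hK, hD, hE], ih]
              simp [Prod.ext_iff, hR, hK, hD, hE]
              omega

-- ===== VERDICT (by name: the statement is the Claim_ definition above) =====
theorem estimate_charge_distribution_py_spec : Claim_equal_estimate_charge_distribution_py := by
  intro s _
  unfold Spec_estimate_charge_distribution_py estimate_charge_distribution_py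
    estimate_charge_distribution_py_alt pvSumCounts
  have hRK : ("RK" : String).toList = ['R', 'K'] := rfl
  have hDE : ("DE" : String).toList = ['D', 'E'] := rfl
  have hRKDE : (("RK" : String) ++ "DE").toList = ['R', 'K', 'D', 'E'] := rfl
  simp only [pv_fold_inv, hRK, hDE, hRKDE, List.map_cons, List.map_nil, List.sum_cons,
    List.sum_nil, PySem.Str.count_eq, PySem.Str.len_eq, String.toList_ofList]
  simp [pv_count_singleton, Prod.ext_iff]
  omega
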